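-- pv_equiv track=rewrite | github.com/code-study-classes/python-basics-PyroKsen | practice_package/loops.py | find_fibonacci_index
-- ===== SOURCE A (Python) =====
-- def find_fibonacci_index(number):
--     fib1, fib2 = 1, 1
--     index = 2
--
--     if number == fib1:
--         return 1
--     elif number == fib2:
--         return 2
--
--     while True:
--         fib_next = fib1 + fib2
--         index += 1
--         if fib_next == number:
--             return index
--         elif fib_next > number:
--             return -1
--         fib1, fib2 = fib2, fib_next
-- ===== SOURCE B (Python) =====
-- def find_fibonacci_index(number):
--     fibs = [1, 1]
--     while fibs[-1] < number:
--         fibs.append(fibs[-1] + fibs[-2])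
--     return fibs.index(number) + 1 if number in fibs else -1
-- ===== Notes on version B (the rewrite author's own statement) =====
-- stated objective: simpler
-- what changed: B builds the Fibonacci list up to number in one loop and then answers with a plain membership/index lookup, instead of A's incremental pairwise comparisons interleaved with three-way return branches inside an infinite loop.
import Mathlib
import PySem

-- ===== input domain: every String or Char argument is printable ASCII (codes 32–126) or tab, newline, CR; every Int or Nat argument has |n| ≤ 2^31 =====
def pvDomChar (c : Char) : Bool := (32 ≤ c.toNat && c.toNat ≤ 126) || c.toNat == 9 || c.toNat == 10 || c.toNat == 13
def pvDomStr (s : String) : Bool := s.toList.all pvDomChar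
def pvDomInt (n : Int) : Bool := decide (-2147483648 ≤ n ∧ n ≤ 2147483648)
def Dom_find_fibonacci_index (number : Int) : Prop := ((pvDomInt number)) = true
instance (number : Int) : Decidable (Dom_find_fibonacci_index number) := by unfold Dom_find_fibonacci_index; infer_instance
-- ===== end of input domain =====

-- B builds the Fibonacci list first and then looks the number up, replacing A's
-- interleaved compare-as-you-go loop; objective: simpler.


-- ===== PORT A =====
-- A's `while True` loop; the proof arguments 0 < fib1 ≤ fib2 (true at the initial call
-- and preserved) only justify termination, the computation is A's three-way branch.
def findFibLoopA (number fib1 fib2 index : Int) (h1 : 0 < fib1) (h2 : fib1 ≤ fib2) : Int :=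
  let fib_next := fib1 + fib2
  if fib_next = number then index + 1
  else if fib_next > number then -1
  else findFibLoopA number fib2 fib_next (index + 1) (lt_of_lt_of_le h1 h2) (by omega)
termination_by (number - fib2).toNat
decreasing_by simp only [gt_iff_lt, not_lt] at *; omega

def find_fibonacci_index (number : Int) : Int :=
  if number = 1 then 1
  else if number = 1 then 2   -- A's dead `elif number == fib2` branch
  else findFibLoopA number 1 1 2 (by norm_num) (le_refl 1)

-- ===== PORT B =====
-- B's `while fibs[-1] < number: fibs.append(...)` loop: the list is kept as
-- acc ++ [a, b] (a, b = its last two elements); same proof-only termination arguments.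
def buildFibs (number a b : Int) (acc : List Int) (ha : 0 < a) (hab : a ≤ b) : List Int :=
  if b < number then
    buildFibs number b (a + b) (acc ++ [a]) (lt_of_lt_of_le ha hab) (by omega)
  else acc ++ [a, b]
termination_by (number - b).toNat
decreasing_by omega

def find_fibonacci_index_alt (number : Int) : Int :=
  let fibs := buildFibs number 1 1 [] (by norm_num) (le_refl 1)
  match PySem.List.index? fibs number with
  | some i => (i : Int) + 1
  | none => -1

-- ===== PRECONDITION & SPEC =====
def Spec_find_fibonacci_index (number : Int) (out : Int) : Prop := out = find_fibonacci_index_alt number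
instance (number : Int) (out : Int) : Decidable (Spec_find_fibonacci_index number out) := by unfold Spec_find_fibonacci_index; infer_instance

-- ===== CLAIM (what is proved, stated in full; the proofs are below) =====
def Claim_equal_find_fibonacci_index : Prop := ∀ (number : Int), Dom_find_fibonacci_index number → Spec_find_fibonacci_index number (find_fibonacci_index number)

-- ===== LEMMAS AND PROOFS =====

theorem index?_of_not_mem {l : List Int} {v : Int} (h : v ∉ l) :
    PySem.List.index? l v = none := (PySem.List.index?_eq_none_iff _ _).mpr h

-- core loop correspondence: A's running pair (a, b) with index = acc.length + 2
-- versus B's list acc ++ [a, b], provided number does not occur in the list so far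
theorem loop_eq (number : Int) : ∀ (n : ℕ) (a b : Int) (acc : List Int)
    (ha : 0 < a) (hab : a ≤ b), n = (number - b).toNat → number ∉ acc ++ [a, b] →
    findFibLoopA number a b ((acc.length : Int) + 2) ha hab =
      (match PySem.List.index? (buildFibs number a b acc ha hab) number with
       | some i => (i : Int) + 1
       | none => -1) := by
  intro n
  induction n using Nat.strong_induction_on with
  | _ n ih =>
    intro a b acc ha hab hn hmem
    rw [findFibLoopA, buildFibs]
    simp only [List.mem_append, List.mem_cons, List.not_mem_nil, or_false] at hmem
    push Not at hmem
    obtain ⟨hpa, hna, hnb⟩ := hmem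
    by_cases hlt : b < number
    · simp only [if_pos hlt]
      by_cases heq : a + b = number
      · -- found: the list becomes acc ++ [a, b, number], first occurrence at acc.length + 2
        simp only [if_pos heq]
        rw [buildFibs, if_neg (by omega : ¬ a + b < number), heq]
        have hnot : number ∉ (acc ++ [a]) ++ [b] := by
          simp [hpa, hna, hnb]
        have hsplit : (acc ++ [a]) ++ [b, number] = ((acc ++ [a]) ++ [b]) ++ [number] := by
          simp
        rw [hsplit, PySem.List.index?_append_singleton_self _ _ hnot]
        simp
      · by_cases hgt : a + b > number
        · -- overshoot: both return -1
          simp only [if_neg heq, if_pos hgt]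
          rw [buildFibs, if_neg (by omega : ¬ a + b < number)]
          rw [index?_of_not_mem
            (by simp [hpa, hna, hnb]; omega)]
        · -- continue: one step of each loop, then the induction hypothesis
          simp only [if_neg heq, if_neg hgt]
          have hrec := ih (number - (a + b)).toNat (by omega)
            b (a + b) (acc ++ [a]) (lt_of_lt_of_le ha hab) (by omega) rfl
            (by simp [hpa, hna, hnb]; omega)
          have hlen : ((acc ++ [a]).length : Int) + 2 = (acc.length : Int) + 2 + 1 := by
            simp; ring
          rw [hlen] at hrec
          exact hrec
    · -- b ≥ number: the list loop stops; A's next value a + b overshoots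
      have hbgt : number < b := lt_of_le_of_ne (not_lt.mp hlt) hnb
      rw [if_neg hlt, if_neg (by omega : ¬ a + b = number),
        if_pos (by omega : a + b > number)]
      rw [index?_of_not_mem (by simp [hpa, hna, hnb])]

-- ===== VERDICT (by name: the statement is the Claim_ definition above) =====
theorem find_fibonacci_index_spec : Claim_equal_find_fibonacci_index := by
  intro number _
  unfold Spec_find_fibonacci_index find_fibonacci_index find_fibonacci_index_alt
  by_cases h1 : number = 1
  · subst h1
    have hb : buildFibs 1 1 1 [] (by norm_num) (le_refl 1) = [1, 1] := by
      rw [buildFibs]; norm_num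
    rw [if_pos rfl, hb]
    decide
  · simp only [if_neg h1]
    have := loop_eq number (number - 1).toNat 1 1 [] (by norm_num) (le_refl 1) rfl
      (by simp [h1])
    simpa using this
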